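-- pv_equiv track=rewrite | github.com/liopash/aoc2024 | aoc2024/day5/solution.py | check_rules_apply
-- ===== SOURCE A (Python) =====
-- def check_rules_apply(rules, input_line):
--     '''
--     Check if rules apply to the input line
--     '''
--     rule_set = set(rules)
--     elements = input_line.split(',')
--
--     for i in range(len(elements)):
--         for j in range(i + 1, len(elements)):
--             pair = (elements[i], elements[j])
--             if pair not in rule_set:
--                 return False
--
--     return True
-- ===== SOURCE B (Python) =====
-- def _pairs(elements):
--     if not elements:
--         return []
--     head, rest = elements[0], elements[1:]
--     return [(head, y) for y in rest] + _pairs(rest)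
--
--
-- def check_rules_apply(rules, input_line):
--     '''
--     Check if rules apply to the input line
--     '''
--     return set(_pairs(input_line.split(','))) <= set(rules)
-- ===== Notes on version B (the rewrite author's own statement) =====
-- stated objective: simpler
-- what changed: Replaces the index-based nested loops with per-pair early return by building the set of all required ordered pairs once (structural recursion on the element list) and testing it with a single set-subset check against the rule set.
import Mathlib
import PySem

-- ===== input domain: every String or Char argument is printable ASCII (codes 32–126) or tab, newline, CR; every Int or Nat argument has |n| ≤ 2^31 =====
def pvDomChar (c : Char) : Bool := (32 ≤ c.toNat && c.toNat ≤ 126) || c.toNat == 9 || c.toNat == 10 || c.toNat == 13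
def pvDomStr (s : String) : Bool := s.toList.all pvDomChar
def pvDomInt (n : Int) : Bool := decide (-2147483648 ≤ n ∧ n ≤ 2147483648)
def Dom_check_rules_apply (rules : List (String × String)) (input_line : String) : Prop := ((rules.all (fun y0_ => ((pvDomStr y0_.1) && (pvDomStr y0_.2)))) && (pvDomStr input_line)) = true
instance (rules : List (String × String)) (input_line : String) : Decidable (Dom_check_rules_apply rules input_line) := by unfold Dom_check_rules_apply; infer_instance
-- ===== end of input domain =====

-- B builds the set of all required ordered pairs once and does a single set-subset
-- check against the rule set, instead of A's nested index loops with early return (simpler decomposition; same cost).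

-- ===== PORT A =====
-- elements = input_line.split(',')  — sep is the literal ",", never empty, so split? is some; getD [] is never taken
def check_rules_apply (rules : List (String × String)) (input_line : String) : Bool :=
  -- rule_set = set(rules); for i in range(len(elements)): for j in range(i+1, …):
  -- early 'return False' on a missing pair = short-circuiting all
  (PySem.List.pyRange 0 (PySem.List.len ((PySem.Str.split? input_line ",").getD []))).all (fun i =>
    (PySem.List.pyRange (i + 1) (PySem.List.len ((PySem.Str.split? input_line ",").getD []))).all (fun j =>
      PySem.Set.contains (PySem.Set.ofList rules)
        (PySem.List.pyGetD ((PySem.Str.split? input_line ",").getD []) i "",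
         PySem.List.pyGetD ((PySem.Str.split? input_line ",").getD []) j "")))

-- ===== PORT B =====
-- _pairs: all ordered pairs (elements[i], elements[j]) with i < j, by structural recursion
def pvPairs : List String → List (String × String)
  | [] => []
  | x :: xs => xs.map (fun y => (x, y)) ++ pvPairs xs

def check_rules_apply_alt (rules : List (String × String)) (input_line : String) : Bool :=
  PySem.Set.issubset (PySem.Set.ofList (pvPairs ((PySem.Str.split? input_line ",").getD [])))
    (PySem.Set.ofList rules)

-- ===== PRECONDITION & SPEC =====
def Spec_check_rules_apply (rules : List (String × String)) (input_line : String) (out : Bool) : Prop := out = check_rules_apply_alt rules input_line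
instance (rules : List (String × String)) (input_line : String) (out : Bool) : Decidable (Spec_check_rules_apply rules input_line out) := by unfold Spec_check_rules_apply; infer_instance

-- ===== CLAIM (what is proved, stated in full; the proofs are below) =====
def Claim_equal_check_rules_apply : Prop := ∀ (rules : List (String × String)) (input_line : String), Dom_check_rules_apply rules input_line → Spec_check_rules_apply rules input_line (check_rules_apply rules input_line)

-- ===== LEMMAS AND PROOFS =====

-- the Nat-indexed form of A's double loop equals the all-pairs list form
theorem range_all_eq_pvPairs_all (es : List String) (f : String × String → Bool) :
    (List.range es.length).all
      (fun k => (es.drop (k + 1)).all (fun y => f (es.getD k "", y)))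
      = (pvPairs es).all f := by
  induction es with
  | nil => simp [pvPairs]
  | cons x xs ih =>
    rw [List.length_cons, List.range_succ_eq_map, List.all_cons, List.all_map]
    simp only [Function.comp_def, Nat.succ_eq_add_one, List.drop_succ_cons,
      List.getD_cons_succ, List.getD_cons_zero, List.drop_zero]
    rw [ih]
    simp [pvPairs, List.all_map, Function.comp_def]

-- A's double index loop over any element list equals membership of every pair of pvPairs
theorem loopA_eq (S : PySem.Set (String × String)) (es : List String) :
    (PySem.List.pyRange 0 (PySem.List.len es)).all (fun i =>
      (PySem.List.pyRange (i + 1) (PySem.List.len es)).all (fun j =>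
        PySem.Set.contains S (PySem.List.pyGetD es i "", PySem.List.pyGetD es j "")))
      = (pvPairs es).all (fun p => PySem.Set.contains S p) := by
  rw [PySem.List.len_eq, PySem.List.pyRange_zero_nat, List.all_map]
  rw [← range_all_eq_pvPairs_all]
  rw [List.all_eq_not_any_not, List.all_eq_not_any_not
    (l := List.range es.length)
    (p := fun k => (es.drop (k + 1)).all fun y => PySem.Set.contains S (es.getD k "", y))]
  congr 1
  refine PySem.List.any_congr_mem (fun k hk => ?_)
  simp only [Function.comp_def]
  congr 1
  have hmap : (PySem.List.pyRange ((k : Int) + 1) (es.length : Int)).map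
      (fun j => PySem.List.pyGetD es j "") = es.drop ((k : Int) + 1).toNat :=
    PySem.List.map_pyGetD_pyRange' es "" (by positivity)
  rw [show List.drop (k + 1) es
      = (PySem.List.pyRange ((k : Int) + 1) (es.length : Int)).map
          (fun j => PySem.List.pyGetD es j "") from by rw [hmap]; norm_num]
  rw [List.all_map]
  simp [Function.comp_def]

-- ===== VERDICT (by name: the statement is the Claim_ definition above) =====
theorem check_rules_apply_spec : Claim_equal_check_rules_apply := by
  intro rules input_line _hdom
  unfold Spec_check_rules_apply check_rules_apply check_rules_apply_alt
  rw [loopA_eq]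
  rw [Bool.eq_iff_iff]
  simp only [List.all_eq_true, PySem.Set.contains_iff, PySem.Set.issubset_iff,
    PySem.Set.mem_ofList]
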